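-- pv_equiv track=rewrite | github.com/degrado-lab/ligand-vdGs | ligand_vdgs/preprocessing/deduplicate_redun_vdgs.py | permute_duplicates
-- ===== SOURCE A (Python) =====
-- from itertools import combinations, permutations, product
--
-- def permute_duplicates(seq):
--     # Dictionary to store indices for each element in the sequence
--     seen = {}
--     for i, item in enumerate(seq):
--         if item not in seen:
--             seen[item] = []
--         seen[item].append(i)
--
--     permute_groups = [] # list of all index groups that have duplicates
--     for indices in seen.values():
--         if len(indices) > 1:  # only interested in elements with duplicates
--             permute_groups.append(indices)
--
--     if not permute_groups: # no duplicates, so return the original index list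
--         return [list(range(len(seq)))]
--
--     # generate all possible permutations of indices within each group of duplicates
--     permuted_idx_lists = []
--     for perm_combination in product(*[permutations(group) for group in permute_groups]):
--         # start with the list of original indices
--         permuted_idx = list(range(len(seq)))
--
--         # flatten the product of permutations and assign them to the corresponding positions
--         for group_idx, perm in zip(permute_groups, perm_combination):
--             for orig_idx, new_idx in zip(group_idx, perm):
--                 permuted_idx[orig_idx] = new_idx
--
--         permuted_idx_lists.append(permuted_idx)
--
--     return permuted_idx_lists
-- ===== SOURCE B (Python) =====
-- def permute_duplicates(seq):
--     # group indices by value (insertion order)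
--     seen = {}
--     for i, item in enumerate(seq):
--         seen.setdefault(item, []).append(i)
--     dup = [g for g in seen.values() if len(g) > 1]
--
--     # depth-first backtracking: fill the duplicate positions slot by slot,
--     # in place, emitting a copy of the working list at each leaf
--     cur = list(range(len(seq)))
--     out = []
--
--     def go(gi):
--         if gi == len(dup):
--             out.append(cur.copy())
--             return
--         slots = dup[gi]
--         remaining = list(slots)
--
--         def fill(k):
--             if k == len(slots):
--                 go(gi + 1)
--                 return
--             for j in range(len(remaining)):
--                 v = remaining.pop(j)
--                 cur[slots[k]] = v
--                 fill(k + 1)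
--                 remaining.insert(j, v)
--
--         fill(0)
--
--     go(0)
--     return out
-- ===== Notes on version B (the rewrite author's own statement) =====
-- stated objective: alternative
-- what changed: B replaces A's pipeline (materialize each group's permutations, take their itertools.product, then scatter each combination into a fresh range list) by an itertools-free depth-first backtracking search that mutates a single working index list in place, filling each duplicate group's slots one at a time (choose a remaining index, recurse, undo) and emitting a copy at each leaf; the no-duplicates special case disappears.
import Mathlib
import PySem

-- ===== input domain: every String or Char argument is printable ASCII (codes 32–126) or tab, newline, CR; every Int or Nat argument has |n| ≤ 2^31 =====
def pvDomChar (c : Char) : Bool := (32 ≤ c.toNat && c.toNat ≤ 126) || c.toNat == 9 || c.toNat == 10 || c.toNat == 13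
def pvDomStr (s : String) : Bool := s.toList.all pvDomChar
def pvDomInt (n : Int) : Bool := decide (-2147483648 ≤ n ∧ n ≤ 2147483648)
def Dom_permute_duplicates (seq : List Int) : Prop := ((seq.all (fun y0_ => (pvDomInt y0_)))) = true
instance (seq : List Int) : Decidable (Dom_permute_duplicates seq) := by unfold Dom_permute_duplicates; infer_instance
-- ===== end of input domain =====

-- B replaces A's materialize-permutations/product/scatter pipeline by an in-place
-- depth-first backtracking search that fills the duplicate slots one at a time;
-- alternative algorithm, same output.

-- ===== PORT A =====

-- A's inner double loop: 'for orig_idx, new_idx in zip(group, perm): lst[orig_idx] = new_idx'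
def pdWrite (r : List Int) (g p : List Int) : List Int :=
  (g.zip p).foldl (fun acc oi_ni => PySem.List.pySetD acc oi_ni.1 oi_ni.2) r

-- hand port of itertools.product(*ls) on a list of argument lists (first factor varies slowest);
-- exact: product over finitely many list arguments in CPython's order
def pdProd (ls : List (List (List Int))) : List (List (List Int)) :=
  match ls with
  | [] => [[]]
  | l :: rest => l.flatMap (fun p => (pdProd rest).map (fun cs => p :: cs))

def permute_duplicates (seq : List Int) : List (List Int) :=
  let seen : PySem.Dict Int (List Int) :=
    (PySem.List.enumerate seq).foldl (fun d ix =>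
      (if (d.get? ix.2).isNone then d.insert ix.2 [] else d).modify ix.2 [] (fun l => l ++ [ix.1]))
      PySem.Dict.empty
  let permute_groups : List (List Int) :=
    seen.values.foldl (fun acc g => if g.length > 1 then acc ++ [g] else acc) []
  if permute_groups = [] then
    [PySem.List.pyRange 0 (seq.length : Int) 1]
  else
    (pdProd (permute_groups.map (fun g => PySem.List.permutations g g.length))).foldl
      (fun acc comb =>
        acc ++ [(permute_groups.zip comb).foldl (fun r gp => pdWrite r gp.1 gp.2)
                  (PySem.List.pyRange 0 (seq.length : Int) 1)]) []

-- ===== PORT B =====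

-- B's inner backtracking loop 'fill': for each remaining candidate (in order),
-- pop it, write it into the current slot, recurse, undo; functionally the undo is
-- using the original 'remaining' again for the next j, so the port passes the
-- popped-out list to the recursive call and keeps 'remaining' for the loop.
def pdFill : List Int → List Int → List Int → (List Int → List (List Int)) → List (List Int)
  | [], _, cur, cont => cont cur
  | s :: ss, remaining, cur, cont =>
      (List.range remaining.length).flatMap (fun (j : Nat) =>
        match PySem.List.pop? remaining (j : Int) with
        | none => []
        | some vr => pdFill ss vr.2 (PySem.List.pySetD cur s vr.1) cont)

-- B's outer backtracking function 'go': one duplicate group per level, emit a copy at the leaf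
def pdGo : List (List Int) → List Int → List (List Int)
  | [], cur => [cur]
  | slots :: rest, cur => pdFill slots slots cur (fun c => pdGo rest c)

def permute_duplicates_alt (seq : List Int) : List (List Int) :=
  let seen : PySem.Dict Int (List Int) :=
    (PySem.List.enumerate seq).foldl (fun d ix =>
      (d.setdefault ix.2 []).modify ix.2 [] (fun l => l ++ [ix.1])) PySem.Dict.empty
  let dup : List (List Int) := seen.values.filter (fun g => decide (g.length > 1))
  pdGo dup (PySem.List.pyRange 0 (seq.length : Int) 1)

-- ===== PRECONDITION & SPEC =====
def Spec_permute_duplicates (seq : List Int) (out : List (List Int)) : Prop := out = permute_duplicates_alt seq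
instance (seq : List Int) (out : List (List Int)) : Decidable (Spec_permute_duplicates seq out) := by unfold Spec_permute_duplicates; infer_instance

-- ===== CLAIM (what is proved, stated in full; the proofs are below) =====
def Claim_equal_permute_duplicates : Prop := ∀ (seq : List Int), Dom_permute_duplicates seq → Spec_permute_duplicates seq (permute_duplicates seq)

-- ===== LEMMAS AND PROOFS =====

-- A's "if item not in seen: seen[item] = []" step equals B's setdefault step
theorem pd_seen_step_eq (d : PySem.Dict Int (List Int)) (x : Int) :
    (if (d.get? x).isNone then d.insert x ([] : List Int) else d) = d.setdefault x [] := by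
  by_cases h : d.contains x = true
  · rw [PySem.Dict.setdefault_of_contains _ _ h]
    have hg : ¬ d.get? x = none := by
      intro hn; rw [PySem.Dict.get?_eq_none_iff_contains] at hn; simp [h] at hn
    simp [Option.isNone_iff_eq_none, hg]
  · have h' : d.contains x = false := by simpa using h
    rw [PySem.Dict.setdefault_of_not_contains _ _ h']
    have hg : d.get? x = none := (PySem.Dict.get?_eq_none_iff_contains d x).mpr h'
    simp [hg]

-- abbreviations used only in the proofs
def pdPerms (g : List Int) : List (List Int) := PySem.List.permutations g g.length

def pdScatter (gs : List (List Int)) (r : List Int) (cs : List (List Int)) : List Int :=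
  (gs.zip cs).foldl (fun t gp => pdWrite t gp.1 gp.2) r

-- one unfolding step of PySem.List.permutations at a successor arity
theorem pd_perms_succ (xs : List Int) (r : Nat) :
    PySem.List.permutations xs (r + 1)
      = (List.range xs.length).flatMap (fun i =>
          match xs[i]? with
          | none => []
          | some x => (PySem.List.permutations (xs.eraseIdx i) r).map (fun p => x :: p)) := by
  rw [PySem.List.permutations.eq_2]
  apply List.flatMap_congr
  intro i _
  cases h : xs[i]? <;> simp

-- the backtracking slot filler enumerates exactly the r-permutations of 'remaining'
theorem pd_fill_eq (slots : List Int) :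
    ∀ (remaining cur : List Int) (cont : List Int → List (List Int)),
    pdFill slots remaining cur cont
      = (PySem.List.permutations remaining slots.length).flatMap
          (fun p => cont (pdWrite cur slots p)) := by
  induction slots with
  | nil =>
      intro remaining cur cont
      simp [pdFill, pdWrite]
  | cons s ss ih =>
      intro remaining cur cont
      rw [pdFill, List.length_cons, pd_perms_succ]
      rw [List.flatMap_assoc]
      apply List.flatMap_congr
      intro j hj
      have hjl : j < remaining.length := List.mem_range.mp hj
      have hget : remaining[j]? = some remaining[j] := List.getElem?_eq_getElem hjl
      have hpop : PySem.List.pop? remaining (j : Int) = some (remaining[j], remaining.eraseIdx j) :=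
        PySem.List.pop?_natCast remaining j hjl
      rw [hpop, hget]
      simp only [List.flatMap_map]
      rw [ih]
      apply List.flatMap_congr
      intro p _
      simp [pdWrite]

-- the backtracking search equals A's map over the product of group permutations
theorem pd_go_eq (gs : List (List Int)) :
    ∀ (cur : List Int),
    pdGo gs cur = (pdProd (gs.map pdPerms)).map (pdScatter gs cur) := by
  induction gs with
  | nil =>
      intro cur
      simp [pdGo, pdProd, pdScatter]
  | cons slots rest ih =>
      intro cur
      rw [pdGo, pd_fill_eq]
      simp only [List.map_cons, pdProd, List.map_flatMap]
      apply List.flatMap_congr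
      intro p _
      rw [ih, List.map_map]
      apply List.map_congr_left
      intro cs _
      simp [pdScatter, Function.comp, pdWrite]

theorem permute_duplicates_eq_alt (seq : List Int) :
    permute_duplicates seq = permute_duplicates_alt seq := by
  simp only [permute_duplicates, permute_duplicates_alt]
  -- the two 'seen' dicts coincide
  have hseen : (PySem.List.enumerate seq).foldl (fun d ix =>
      (if (d.get? ix.2).isNone then d.insert ix.2 ([] : List Int) else d).modify ix.2 []
        (fun l => l ++ [ix.1])) PySem.Dict.empty
      = (PySem.List.enumerate seq).foldl (fun d ix =>
      (d.setdefault ix.2 []).modify ix.2 [] (fun l => l ++ [ix.1])) PySem.Dict.empty := by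
    apply PySem.List.foldl_congr_mem
    intro d ix _
    rw [pd_seen_step_eq]
  rw [hseen]
  set seen := (PySem.List.enumerate seq).foldl (fun d ix =>
      (d.setdefault ix.2 []).modify ix.2 [] (fun l => l ++ [ix.1])) PySem.Dict.empty with hs
  -- A's permute_groups fold is B's filter
  have hgroups : seen.values.foldl (fun acc g => if g.length > 1 then acc ++ [g] else acc) []
      = seen.values.filter (fun g => decide (g.length > 1)) := by
    simpa using PySem.List.foldl_append_ite_eq_filter (fun g : List Int => g.length > 1) seen.values []
  rw [hgroups]
  set groups := seen.values.filter (fun g => decide (g.length > 1)) with hg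
  rw [pd_go_eq]
  by_cases hempty : groups = []
  · rw [if_pos hempty, hempty]
    simp [pdProd, pdScatter]
  · rw [if_neg hempty]
    rw [show (fun g : List Int => PySem.List.permutations g g.length) = pdPerms from rfl]
    show (pdProd (groups.map pdPerms)).foldl
        (fun acc comb => acc ++ [pdScatter groups (PySem.List.pyRange 0 (seq.length : Int) 1) comb]) []
        = List.map (pdScatter groups (PySem.List.pyRange 0 (seq.length : Int) 1)) (pdProd (groups.map pdPerms))
    rw [PySem.List.foldl_append_singleton_eq_map]
    simp

-- ===== VERDICT (by name: the statement is the Claim_ definition above) =====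
theorem permute_duplicates_spec : Claim_equal_permute_duplicates := by
  intro seq _
  unfold Spec_permute_duplicates
  exact permute_duplicates_eq_alt seq
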